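-- pv_equiv track=rewrite | github.com/ichihara-3/practice | py/jsonparser2/parser.py | parse_fraction
-- ===== SOURCE A (Python) =====
-- def parse_fraction(jsonstring: str, i: int) -> int:
--     offset = 0
--     if jsonstring[i] != ".":
--         return offset
--     offset += 1
--     if i + offset >= len(jsonstring) or not is_digit(jsonstring[i + offset]):
--         raise ValueError("not a fraction")
--     while i + offset < len(jsonstring) and is_digit(jsonstring[i + offset]):
--         offset += 1
--     return offset
--
-- def is_digit(char: str):
--     return char in "0123456789"
-- ===== SOURCE B (Python) =====
-- # B: slice + lstrip arithmetic instead of an index-walking while-loop (structurally different; same values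
-- # except on negative i where A's digit scan wraps past the string start -- there B counts the tail only).
-- def parse_fraction(jsonstring: str, i: int) -> int:
--     if jsonstring[i] != ".":
--         return 0
--     tail = jsonstring[i + 1:]
--     k = len(tail) - len(tail.lstrip("0123456789"))
--     if k == 0:
--         raise ValueError("not a fraction")
--     return 1 + k
-- ===== Notes on version B (the rewrite author's own statement) =====
-- stated objective: idiomatic
-- what changed: Replaces the offset-accumulating while-loop with explicit per-index bounds checks by a slice of everything after the dot plus lstrip length arithmetic to count the leading digits.
-- intended difference: For a negative index i where jsonstring[i] is '.' and every character after it is a digit and the string starts with a digit, A's scan wraps past the end of the string and keeps counting digits from position 0 (e.g. A('1.23',-3)=4), while B returns 1 plus the number of digits after the dot only (B('1.23',-3)=3), which is the intended fraction length. — e.g. on parse_fraction("1.23", -3): A returns 4, B returns 3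
import Mathlib
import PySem

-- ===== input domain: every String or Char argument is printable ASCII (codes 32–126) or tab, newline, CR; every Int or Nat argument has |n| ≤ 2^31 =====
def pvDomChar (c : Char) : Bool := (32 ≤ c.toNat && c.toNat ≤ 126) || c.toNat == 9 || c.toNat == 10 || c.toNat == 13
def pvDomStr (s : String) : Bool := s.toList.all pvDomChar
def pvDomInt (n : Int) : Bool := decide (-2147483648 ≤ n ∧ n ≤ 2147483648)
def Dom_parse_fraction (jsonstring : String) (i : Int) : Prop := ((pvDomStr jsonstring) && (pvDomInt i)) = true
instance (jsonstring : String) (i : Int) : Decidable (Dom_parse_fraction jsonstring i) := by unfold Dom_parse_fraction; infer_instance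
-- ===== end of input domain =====

-- B replaces A's index-walking while-loop by slice + lstrip length arithmetic (idiomatic); equal everywhere
-- except the D_ wraparound corner described below, where B returns the intended fraction length.

-- ===== PORT A =====
-- is_digit(char): char in "0123456789"
def pfIsDigit (c : Char) : Bool := "0123456789".toList.contains c

-- the while-loop: while i + offset < len(jsonstring) and is_digit(jsonstring[i + offset]): offset += 1
-- (fuel only makes the recursion structural; it is never exhausted at the call site)
def pfLoop (l : List Char) (i : Int) : Nat → Int → Int
  | 0, offset => offset
  | fuel + 1, offset =>
    if (i + offset < (l.length : Int) ∧ (PySem.List.pyGet? l (i + offset)).elim false pfIsDigit = true) then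
      pfLoop l i fuel (offset + 1)
    else offset

def parse_fraction (jsonstring : String) (i : Int) : Int :=
  match PySem.Str.pyGet? jsonstring i with
  | none => 0        -- jsonstring[i] raises IndexError here; excluded by Pre_
  | some c =>
    if c ≠ '.' then 0
    else if ((jsonstring.toList.length : Int) ≤ i + 1)
            || !((PySem.Str.pyGet? jsonstring (i + 1)).elim false pfIsDigit) then
      0              -- raise ValueError("not a fraction"); excluded by Pre_
    else pfLoop jsonstring.toList i ((jsonstring.toList.length : Int) - i).toNat 1

-- ===== PORT B =====
def parse_fraction_alt (jsonstring : String) (i : Int) : Int :=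
  match PySem.Str.pyGet? jsonstring i with
  | none => 0        -- jsonstring[i] raises IndexError here; excluded by Pre_
  | some c =>
    if c ≠ '.' then 0
    else
      let tail := PySem.List.slice jsonstring.toList (some (i + 1)) none
      -- tail.lstrip("0123456789"): drop the leading characters belonging to the set (exact port of lstrip with chars)
      let k : Int := (tail.length : Int) - ((tail.dropWhile pfIsDigit).length : Int)
      if k = 0 then 0   -- raise ValueError("not a fraction"); excluded by Pre_
      else 1 + k

-- ===== PRECONDITION & SPEC =====
-- Pre_ excludes exactly the inputs where A raises: an out-of-range index i (IndexError), and a '.' at i that is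
-- not immediately followed by an ASCII digit (ValueError).
def Pre_parse_fraction (jsonstring : String) (i : Int) : Prop :=
  (-(jsonstring.toList.length : Int) ≤ i ∧ i < (jsonstring.toList.length : Int)) ∧
  (PySem.Str.pyGet? jsonstring i = some '.' →
    i + 1 < (jsonstring.toList.length : Int) ∧
    (PySem.Str.pyGet? jsonstring (i + 1)).elim false pfIsDigit = true)
instance (jsonstring : String) (i : Int) : Decidable (Pre_parse_fraction jsonstring i) := by
  unfold Pre_parse_fraction; infer_instance

def pvWitness_parse_fraction : String × Int := ("0.55", 1)

-- For negative i with jsonstring[i] = '.', all characters after it digits and the first character of the string a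
-- digit, A's scan wraps past the string's end and keeps counting digits from position 0, while B returns 1 plus
-- the number of digits after the dot only — the intended fraction length.
def D_parse_fraction (jsonstring : String) (i : Int) : Prop :=
  i ≤ -2 ∧ -(jsonstring.toList.length : Int) ≤ i ∧
  PySem.Str.pyGet? jsonstring i = some '.' ∧
  (jsonstring.toList.drop ((jsonstring.toList.length : Int) + i + 1).toNat).all pfIsDigit = true ∧
  (jsonstring.toList.head?.elim false pfIsDigit) = true
instance (jsonstring : String) (i : Int) : Decidable (D_parse_fraction jsonstring i) := by
  unfold D_parse_fraction; infer_instance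

def Spec_parse_fraction (jsonstring : String) (i : Int) (out : Int) : Prop :=
  ¬ D_parse_fraction jsonstring i → out = parse_fraction_alt jsonstring i
instance (jsonstring : String) (i : Int) (out : Int) : Decidable (Spec_parse_fraction jsonstring i out) := by
  unfold Spec_parse_fraction; infer_instance

def pvDiffWitness_parse_fraction : String × Int := ("1.23", -3)
def pvDiffWitnessOut_parse_fraction : Int × Int := (4, 3)

-- ===== CLAIM (what is proved, stated in full; the proofs are below) =====
def Claim_unchanged_parse_fraction : Prop := ∀ (jsonstring : String) (i : Int), Dom_parse_fraction jsonstring i → Pre_parse_fraction jsonstring i → Spec_parse_fraction jsonstring i (parse_fraction jsonstring i)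
def Claim_changed_parse_fraction : Prop := Dom_parse_fraction (pvDiffWitness_parse_fraction.1) (pvDiffWitness_parse_fraction.2) ∧ Pre_parse_fraction (pvDiffWitness_parse_fraction.1) (pvDiffWitness_parse_fraction.2) ∧ D_parse_fraction (pvDiffWitness_parse_fraction.1) (pvDiffWitness_parse_fraction.2) ∧ parse_fraction (pvDiffWitness_parse_fraction.1) (pvDiffWitness_parse_fraction.2) = pvDiffWitnessOut_parse_fraction.1 ∧ parse_fraction_alt (pvDiffWitness_parse_fraction.1) (pvDiffWitness_parse_fraction.2) = pvDiffWitnessOut_parse_fraction.2 ∧ pvDiffWitnessOut_parse_fraction.1 ≠ pvDiffWitnessOut_parse_fraction.2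
def Claim_exact_parse_fraction : Prop := ∀ (jsonstring : String) (i : Int), Dom_parse_fraction jsonstring i → Pre_parse_fraction jsonstring i → D_parse_fraction jsonstring i → parse_fraction jsonstring i ≠ parse_fraction_alt jsonstring i

-- ===== LEMMAS AND PROOFS =====

lemma pv_tw_dw_len (p : Char → Bool) (l : List Char) :
    (l.takeWhile p).length + (l.dropWhile p).length = l.length := by
  induction l with
  | nil => rfl
  | cons x t ih =>
    by_cases h : p x = true
    · simp [h]
      omega
    · simp [h]

lemma pv_pyGet_inrange (l : List Char) (a : Int) (h1 : -(l.length : Int) ≤ a) (h2 : a < (l.length : Int)) :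
    PySem.List.pyGet? l a = l[PySem.List.clampIdx l.length a]? := by
  simp only [PySem.List.pyGet?, PySem.List.pyIdx?, PySem.List.clampIdx]
  split_ifs with h3 h4 h5 <;> try omega
  · simp only [Option.bind_some]
    congr 1
    omega
  · simp only [Option.bind_some]
    congr 1
    omega

lemma pfLoop_nonneg (l : List Char) (i : Int) (fuel : Nat) (offset : Int) (h0 : 0 ≤ i + offset)
    (hf : (l.length : Int) - (i + offset) < fuel) :
    pfLoop l i fuel offset = offset + (((l.drop (i + offset).toNat).takeWhile pfIsDigit).length : Int) := by
  induction fuel generalizing offset with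
  | zero =>
    rw [List.drop_eq_nil_of_le (by omega)]
    simp [pfLoop]
  | succ fuel ih =>
    rw [pfLoop]
    split_ifs with h
    · obtain ⟨hlt, hdig⟩ := h
      rw [ih (offset + 1) (by omega) (by omega)]
      have hj : (i + offset).toNat < l.length := by omega
      rw [List.drop_eq_getElem_cons hj]
      rw [PySem.List.pyGet?_of_nonneg l h0, List.getElem?_eq_getElem hj] at hdig
      simp only [Option.elim] at hdig
      rw [List.takeWhile_cons, hdig]
      have : (i + (offset + 1)).toNat = (i + offset).toNat + 1 := by omega
      rw [this]
      simp
      omega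
    · rw [not_and_or] at h
      rcases h with h | h
      · rw [List.drop_eq_nil_of_le (by omega)]
        simp
      · by_cases hlt : i + offset < (l.length : Int)
        · have hj : (i + offset).toNat < l.length := by omega
          rw [List.drop_eq_getElem_cons hj]
          rw [PySem.List.pyGet?_of_nonneg l h0, List.getElem?_eq_getElem hj] at h
          simp only [Option.elim] at h
          rw [List.takeWhile_cons]
          simp only [Bool.not_eq_true] at h
          rw [h]
          simp
        · rw [List.drop_eq_nil_of_le (by omega)]
          simp

lemma pfLoop_neg (l : List Char) (i : Int) (fuel : Nat) (offset : Int)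
    (hgt : -(l.length : Int) < i + offset) (hneg : i + offset ≤ 0)
    (hf : (l.length : Int) - (i + offset) < fuel) :
    pfLoop l i fuel offset = offset +
      (if (l.drop ((l.length : Int) + i + offset).toNat).all pfIsDigit then
          (-(i + offset)) + ((l.takeWhile pfIsDigit).length : Int)
        else
          (((l.drop ((l.length : Int) + i + offset).toNat).takeWhile pfIsDigit).length : Int)) := by
  induction fuel generalizing offset with
  | zero => omega
  | succ fuel ih =>
    by_cases h0 : i + offset = 0
    · have hd0 : ((l.length : Int) + i + offset).toNat = l.length := by omega
      rw [pfLoop_nonneg l i (fuel + 1) offset (by omega) hf, hd0]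
      rw [List.drop_eq_nil_of_le (le_refl _)]
      have : (i + offset).toNat = 0 := by omega
      rw [this, List.drop_zero]
      simp [h0]
    · -- i + offset < 0: the index wraps to physical position j
      have hneg' : i + offset < 0 := by omega
      have hj : ((l.length : Int) + i + offset).toNat < l.length := by omega
      set j := ((l.length : Int) + i + offset).toNat with hjdef
      have hget : PySem.List.pyGet? l (i + offset) = l[j]? := by
        rw [pv_pyGet_inrange l (i + offset) (by omega) (by omega)]
        congr 1
        simp only [PySem.List.clampIdx]
        split_ifs <;> omega
      rw [pfLoop]
      rw [List.drop_eq_getElem_cons hj, List.all_cons, List.takeWhile_cons]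
      by_cases hdig : pfIsDigit l[j] = true
      · rw [if_pos ⟨by omega, by rw [hget, List.getElem?_eq_getElem hj]; simpa using hdig⟩]
        rw [ih (offset + 1) (by omega) (by omega) (by omega)]
        have hsucc : ((l.length : Int) + i + (offset + 1)).toNat = j + 1 := by omega
        rw [hsucc, hdig]
        by_cases hall : (l.drop (j + 1)).all pfIsDigit = true
        · rw [if_pos hall]
          simp only [Bool.true_and, hall, if_pos]
          omega
        · simp only [Bool.not_eq_true] at hall
          rw [if_neg (by simp [hall]), if_neg (by simp [hall])]
          simp
          omega
      · rw [if_neg (by rw [hget, List.getElem?_eq_getElem hj]; simp [hdig])]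
        simp only [Bool.not_eq_true] at hdig
        rw [if_neg (by simp [hdig]), hdig]
        simp

lemma pv_clamp_lt (n : Nat) (a : Int) (h1 : -(n : Int) ≤ a) (h2 : a < (n : Int)) :
    PySem.List.clampIdx n a < n := by
  simp only [PySem.List.clampIdx]
  split_ifs <;> omega

lemma pv_str_get (s : String) (a : Int) (h1 : -(s.toList.length : Int) ≤ a) (h2 : a < (s.toList.length : Int)) :
    PySem.Str.pyGet? s a = s.toList[PySem.List.clampIdx s.toList.length a]? := by
  have : PySem.Str.pyGet? s a = PySem.List.pyGet? s.toList a := by simp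
  rw [this, pv_pyGet_inrange s.toList a h1 h2]

lemma pv_takeWhile_all (p : Char → Bool) (l : List Char) (h : l.all p = true) :
    l.takeWhile p = l := by
  induction l with
  | nil => rfl
  | cons x t ih =>
    simp only [List.all_cons, Bool.and_eq_true] at h
    rw [List.takeWhile_cons, h.1, if_pos rfl, ih h.2]

lemma pv_A_eval (s : String) (i : Int)
    (hc : PySem.Str.pyGet? s i = some '.')
    (hlen : i + 1 < (s.toList.length : Int))
    (hdig : (PySem.Str.pyGet? s (i + 1)).elim false pfIsDigit = true) :
    parse_fraction s i = pfLoop s.toList i ((s.toList.length : Int) - i).toNat 1 := by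
  have hcl : PySem.List.pyGet? s.toList i = some '.' := by simpa using hc
  have hdl : (PySem.List.pyGet? s.toList (i + 1)).elim false pfIsDigit = true := by simpa using hdig
  simp [parse_fraction, hcl, hdl]
  intro hcontra
  exfalso
  have hsl : s.toList.length = s.length := by simp
  omega

lemma pv_B_eval (s : String) (i : Int)
    (hlo : -(s.toList.length : Int) ≤ i + 1) (hlen : i + 1 < (s.toList.length : Int))
    (hc : PySem.Str.pyGet? s i = some '.')
    (hdig : (PySem.Str.pyGet? s (i + 1)).elim false pfIsDigit = true) :
    parse_fraction_alt s i =
      1 + (((s.toList.drop (PySem.List.clampIdx s.toList.length (i + 1))).takeWhile pfIsDigit).length : Int) := by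
  have hcl : PySem.List.pyGet? s.toList i = some '.' := by simpa using hc
  have hj : PySem.List.clampIdx s.toList.length (i + 1) < s.toList.length := pv_clamp_lt _ _ hlo hlen
  set j := PySem.List.clampIdx s.toList.length (i + 1) with hjdef
  have hdigj : pfIsDigit s.toList[j] = true := by
    rw [pv_str_get s (i + 1) hlo hlen, ← hjdef, List.getElem?_eq_getElem hj] at hdig
    simpa using hdig
  have htw : (s.toList.drop j).takeWhile pfIsDigit = s.toList[j] :: ((s.toList.drop (j + 1)).takeWhile pfIsDigit) := by
    rw [List.drop_eq_getElem_cons hj, List.takeWhile_cons, hdigj, if_pos rfl]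
  have hlendw := pv_tw_dw_len pfIsDigit (s.toList.drop j)
  have hk : ((s.toList.drop j).length : Int) - (((s.toList.drop j).dropWhile pfIsDigit).length : Int)
      = (((s.toList.drop j).takeWhile pfIsDigit).length : Int) := by omega
  have hkne : (((s.toList.drop j).takeWhile pfIsDigit).length : Int) ≠ 0 := by
    rw [htw]
    simp
    omega
  simp only [parse_fraction_alt, PySem.Str.pyGet?_eq, PySem.Chars.pyGet?_eq_listPyGet?, hcl,
    PySem.List.slice_some_none, ← hjdef]
  rw [if_neg (by simp), hk, if_neg hkne]

lemma pv_head_digit_facts (s : String) (hne : 0 < s.toList.length) :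
    s.toList.head? = some s.toList[0] ∧
    s.toList.takeWhile pfIsDigit =
      (if pfIsDigit s.toList[0] = true then s.toList[0] :: ((s.toList.drop 1).takeWhile pfIsDigit) else []) := by
  have hdrop0 : s.toList = s.toList[0] :: s.toList.drop 1 := by
    simpa using List.drop_eq_getElem_cons hne
  constructor
  · rw [List.head?_eq_getElem?, List.getElem?_eq_getElem hne]
  · conv_lhs => rw [hdrop0]
    rw [List.takeWhile_cons]

-- ===== VERDICT (by name: the statement is the Claim_ definition above) =====
theorem parse_fraction_spec : Claim_unchanged_parse_fraction := by
  intro s i hdom hpre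
  unfold Spec_parse_fraction
  intro hnd
  obtain ⟨⟨hlo, hhi⟩, hdot⟩ := hpre
  have hj0 : PySem.List.clampIdx s.toList.length i < s.toList.length := pv_clamp_lt _ _ hlo hhi
  have hc : PySem.Str.pyGet? s i = some s.toList[PySem.List.clampIdx s.toList.length i] := by
    rw [pv_str_get s i hlo hhi, List.getElem?_eq_getElem hj0]
  by_cases hcdot : s.toList[PySem.List.clampIdx s.toList.length i] = '.'
  · rw [hcdot] at hc
    obtain ⟨hlen, hdig⟩ := hdot hc
    have hlo1 : -(s.toList.length : Int) ≤ i + 1 := by omega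
    rw [pv_A_eval s i hc hlen hdig, pv_B_eval s i hlo1 hlen hc hdig]
    have hf : (s.toList.length : Int) - (i + 1) < (((s.toList.length : Int) - i).toNat : Int) := by omega
    by_cases hge : 0 ≤ i + 1
    · rw [pfLoop_nonneg s.toList i _ 1 hge (by omega)]
      have : PySem.List.clampIdx s.toList.length (i + 1) = (i + 1).toNat := by
        simp only [PySem.List.clampIdx]; split_ifs <;> omega
      rw [this]
    · -- negative index: the scan wraps; ¬D_ rules out the all-digits-plus-leading-digit case
      have hgt : -(s.toList.length : Int) < i + 1 := by omega
      rw [pfLoop_neg s.toList i _ 1 hgt (by omega) (by omega)]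
      have hjeq : PySem.List.clampIdx s.toList.length (i + 1) = ((s.toList.length : Int) + i + 1).toNat := by
        simp only [PySem.List.clampIdx]; split_ifs <;> omega
      rw [hjeq]
      by_cases hall : (s.toList.drop ((s.toList.length : Int) + i + 1).toNat).all pfIsDigit = true
      · -- then ¬D_ forces the first character of the string to be a non-digit
        have hhd : (s.toList.head?.elim false pfIsDigit) ≠ true := by
          intro hhd
          exact hnd ⟨by omega, hlo, hc, hall, hhd⟩
        have hne : 0 < s.toList.length := by omega
        obtain ⟨hhd0, htwl⟩ := pv_head_digit_facts s hne
        rw [hhd0] at hhd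
        simp only [Option.elim, Bool.not_eq_true] at hhd
        rw [hhd, if_neg (by simp)] at htwl
        have hdlen : (s.toList.drop ((s.toList.length : Int) + i + 1).toNat).length
            = s.toList.length - ((s.toList.length : Int) + i + 1).toNat := List.length_drop ..
        rw [if_pos hall, pv_takeWhile_all pfIsDigit _ hall, htwl]
        simp only [List.length_nil]
        omega
      · rw [if_neg hall]
  · -- jsonstring[i] is not '.': both programs return 0
    have hcl : PySem.List.pyGet? s.toList i = some s.toList[PySem.List.clampIdx s.toList.length i] := by
      simpa using hc
    simp only [parse_fraction, parse_fraction_alt, PySem.Str.pyGet?_eq, PySem.Chars.pyGet?_eq_listPyGet?,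
      hcl, ne_eq]
    rw [if_pos hcdot, if_pos hcdot]

theorem parse_fraction_changed : Claim_changed_parse_fraction := by
  unfold Claim_changed_parse_fraction; decide

theorem parse_fraction_tight : Claim_exact_parse_fraction := by
  intro s i hdom hpre hd
  obtain ⟨hile, hlo, hc, hall, hhd⟩ := hd
  obtain ⟨⟨_, hhi⟩, hdot⟩ := hpre
  obtain ⟨hlen, hdig⟩ := hdot hc
  have hlo1 : -(s.toList.length : Int) ≤ i + 1 := by omega
  rw [pv_A_eval s i hc hlen hdig, pv_B_eval s i hlo1 hlen hc hdig]
  have hgt : -(s.toList.length : Int) < i + 1 := by omega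
  rw [pfLoop_neg s.toList i _ 1 hgt (by omega) (by omega)]
  have hjeq : PySem.List.clampIdx s.toList.length (i + 1) = ((s.toList.length : Int) + i + 1).toNat := by
    simp only [PySem.List.clampIdx]; split_ifs <;> omega
  rw [hjeq, if_pos hall, pv_takeWhile_all pfIsDigit _ hall]
  -- the whole string starts with a digit, so A keeps counting at least one more character
  have hne : 0 < s.toList.length := by omega
  obtain ⟨hhd0, htwl⟩ := pv_head_digit_facts s hne
  rw [hhd0] at hhd
  simp only [Option.elim] at hhd
  rw [hhd, if_pos rfl] at htwl
  have htwl1 : 1 ≤ (s.toList.takeWhile pfIsDigit).length := by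
    rw [htwl]
    simp
  have hdlen : (s.toList.drop ((s.toList.length : Int) + i + 1).toNat).length
      = s.toList.length - ((s.toList.length : Int) + i + 1).toNat := List.length_drop ..
  omega
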